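-- pv_equiv track=rewrite | github.com/davidrogger/trybe-webdev-fullstack-course | 04-ciencia-da-computacao/m04-session-01-introduction-python/m04-day-02-data-output-input/m04s01d02Exercises/m04s01d02-exercise-day/m04s01d02e04.py | categories_counter
-- ===== SOURCE A (Python) =====
-- def categories_counter(books):
--     categories_counted = {}
--     for book in books:
--         for category in book["categories"]:
--             if len(category) > 0:
--                 if category not in categories_counted:
--                     categories_counted[category] = 0
--                 categories_counted[category] += 1
--     return categories_counted
-- ===== SOURCE B (Python) =====
-- def categories_counter(books):
--     cats = [c for book in books for c in book["categories"] if len(c) > 0]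
--     return {c: cats.count(c) for c in dict.fromkeys(cats)}
-- ===== Notes on version B (the rewrite author's own statement) =====
-- stated objective: simpler
-- what changed: Replaces the nested-loop incremental dict tally with a flatten-filter comprehension followed by a dict comprehension that counts each first-occurrence-deduplicated category with list.count.
import Mathlib
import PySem

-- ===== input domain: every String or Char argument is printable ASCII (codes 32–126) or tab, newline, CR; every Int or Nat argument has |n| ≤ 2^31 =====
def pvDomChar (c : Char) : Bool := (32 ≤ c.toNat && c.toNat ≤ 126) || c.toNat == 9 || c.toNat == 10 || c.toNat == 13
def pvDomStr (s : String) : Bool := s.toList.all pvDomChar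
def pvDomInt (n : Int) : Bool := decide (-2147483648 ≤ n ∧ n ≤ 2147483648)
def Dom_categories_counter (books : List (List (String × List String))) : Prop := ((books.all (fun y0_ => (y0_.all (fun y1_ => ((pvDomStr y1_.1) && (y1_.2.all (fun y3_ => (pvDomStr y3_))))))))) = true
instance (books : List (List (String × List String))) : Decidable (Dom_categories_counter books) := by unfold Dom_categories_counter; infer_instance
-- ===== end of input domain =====

-- B replaces A's nested-loop incremental dict tally with flatten+filter, ordered dedup, and per-category list.count (simpler decomposition; not faster).


-- ===== PORT A =====
def categories_counter (books : List (List (String × List String))) : List (String × Int) :=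
  (books.foldl (fun d book =>
      (((PySem.Dict.mk book).get? "categories").getD []).foldl
        (fun d c =>
          if PySem.Str.len c > 0 then
            let d1 := if d.contains c then d else d.insert c 0
            d1.insert c (d1.getD c 0 + 1)
          else d) d)
    PySem.Dict.empty).items

-- ===== PORT B =====
def categories_counter_alt (books : List (List (String × List String))) : List (String × Int) :=
  let cats := books.foldl (fun acc book =>
      acc ++ (((PySem.Dict.mk book).get? "categories").getD []).filter (fun c => PySem.Str.len c > 0)) []
  (PySem.List.dedup cats).map (fun c => (c, (cats.count c : Int)))

-- ===== PRECONDITION & SPEC =====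
-- Pre_: every book dict has the key "categories"; on a book without it A (and B) raise KeyError.
def Pre_categories_counter (books : List (List (String × List String))) : Prop :=
  (books.all (fun book => (PySem.Dict.mk book).contains "categories")) = true
instance (books : List (List (String × List String))) : Decidable (Pre_categories_counter books) := by unfold Pre_categories_counter; infer_instance
def pvWitness_categories_counter : (List (List (String × List String))) :=
  [[("categories", ["sf", "", "sf"]), ("title", ["x"])], [("categories", ["poetry"])]]

def Spec_categories_counter (books : List (List (String × List String))) (out : List (String × Int)) : Prop := out = categories_counter_alt books
instance (books : List (List (String × List String))) (out : List (String × Int)) : Decidable (Spec_categories_counter books out) := by unfold Spec_categories_counter; infer_instance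

-- ===== CLAIM (what is proved, stated in full; the proofs are below) =====
def Claim_equal_categories_counter : Prop := ∀ (books : List (List (String × List String))), Dom_categories_counter books → Pre_categories_counter books → Spec_categories_counter books (categories_counter books)

-- ===== LEMMAS AND PROOFS =====

-- A's guarded increment step over one list equals the Counter step over its filtered list.
theorem stepA_body (d : PySem.Dict String Int) (c : String) :
    (if PySem.Str.len c > 0 then
        let d1 := if d.contains c then d else d.insert c 0
        d1.insert c (d1.getD c 0 + 1)
      else d)
    = (if PySem.Str.len c > 0 then d.insert c (d.getD c 0 + 1) else d) := by
  by_cases hc : d.contains c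
  · simp [hc]
  · simp [hc, PySem.Dict.insert_insert_self, PySem.Dict.getD_insert_self,
      PySem.Dict.getD_of_not_contains]

theorem stepA_eq (l : List String) (d : PySem.Dict String Int) :
    l.foldl (fun d c =>
        if PySem.Str.len c > 0 then
          let d1 := if d.contains c then d else d.insert c 0
          d1.insert c (d1.getD c 0 + 1)
        else d) d
    = (l.filter (fun c => PySem.Str.len c > 0)).foldl
        (fun d c => d.insert c (d.getD c 0 + 1)) d := by
  rw [List.foldl_filter]
  simp only [stepA_body, decide_eq_true_eq]

-- A's whole nested loop is the insert-counter fold over the flattened filtered categories.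
theorem loopA_eq (books : List (List (String × List String))) (d : PySem.Dict String Int) :
    books.foldl (fun d book =>
        (((PySem.Dict.mk book).get? "categories").getD []).foldl
          (fun d c =>
            if PySem.Str.len c > 0 then
              let d1 := if d.contains c then d else d.insert c 0
              d1.insert c (d1.getD c 0 + 1)
            else d) d) d
    = (books.flatMap (fun book =>
        (((PySem.Dict.mk book).get? "categories").getD []).filter (fun c => PySem.Str.len c > 0))).foldl
        (fun d c => d.insert c (d.getD c 0 + 1)) d := by
  induction books generalizing d with
  | nil => rfl
  | cons b rest ih =>
    rw [List.foldl_cons, List.flatMap_cons, List.foldl_append, ih, stepA_eq]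

-- ===== VERDICT (by name: the statement is the Claim_ definition above) =====
theorem categories_counter_spec : Claim_equal_categories_counter := by
  intro books _ _
  unfold Spec_categories_counter categories_counter categories_counter_alt
  rw [loopA_eq, PySem.List.foldl_append_eq_flatMap,
    PySem.Dict.foldl_insert_getD_add_one_eq_counter, PySem.Dict.items_counter]
  simp [PySem.List.dedup_eq_ofList]
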